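-- pv_equiv track=rewrite | github.com/aliabbassi-1337/sadie-gtm | workflows/dedupe_rms.py | group_by_name_city
-- ===== SOURCE A (Python) =====
-- from typing import Optional, Dict, List, Any, Tuple
--
-- def normalize_text(text: str) -> str:
--     """Normalize text for matching."""
--     if not text:
--         return ''
--     return text.strip().lower()
--
-- def group_by_name_city(records: List[Dict]) -> Dict[Tuple[str, str], List[Dict]]:
--     """Group records by normalized (name + city)."""
--     groups = {}
--     for r in records:
--         key = (normalize_text(r.get('name', '')), normalize_text(r.get('city', '')))
--         if key not in groups:
--             groups[key] = []
--         groups[key].append(r)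
--     return groups
-- ===== SOURCE B (Python) =====
-- def group_by_name_city(records):
--     """Group records by normalized (name + city): compute all keys up front,
--     dedupe them in first-occurrence order, then build each group by one
--     filtering pass over the (record, key) pairs."""
--     def norm(text):
--         if not text:
--             return ''
--         return text.strip().lower()
--
--     keys = [(norm(r.get('name', '')), norm(r.get('city', ''))) for r in records]
--     order = list(dict.fromkeys(keys))
--     return {k: [r for r, kk in zip(records, keys) if kk == k] for k in order}
-- ===== Notes on version B (the rewrite author's own statement) =====
-- stated objective: alternative
-- what changed: A builds the groups incrementally, bucketing each record into a dict as it scans; B computes all normalized keys in one pass, dedupes them in first-occurrence order, and then builds each group by a separate filtering pass over the (record, key) pairs.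
import Mathlib
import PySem

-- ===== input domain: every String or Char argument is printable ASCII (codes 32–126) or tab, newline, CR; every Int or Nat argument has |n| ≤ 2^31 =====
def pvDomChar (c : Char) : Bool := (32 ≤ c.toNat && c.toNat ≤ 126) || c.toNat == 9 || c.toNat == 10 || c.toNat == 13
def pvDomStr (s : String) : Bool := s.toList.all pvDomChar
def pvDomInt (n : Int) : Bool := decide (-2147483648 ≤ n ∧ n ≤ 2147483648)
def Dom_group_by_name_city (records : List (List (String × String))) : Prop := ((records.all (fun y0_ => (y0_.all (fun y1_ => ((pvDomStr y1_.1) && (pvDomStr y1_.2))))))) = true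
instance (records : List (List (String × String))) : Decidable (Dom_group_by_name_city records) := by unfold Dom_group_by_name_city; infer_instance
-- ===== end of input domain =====

-- B replaces A's incremental dict-bucketing by a two-pass plan (all keys up front, ordered
-- dedup, then one filtering pass per distinct key); objective: alternative, not faster.

-- ===== PORT A =====
-- normalize_text(text)
def pvNorm (t : String) : String :=
  if t = "" then "" else PySem.Str.lower (PySem.Str.strip t)

-- the normalized (name, city) key of one record (shared helper, as in both Pythons)
def pvKey (r : List (String × String)) : String × String :=
  (pvNorm ((PySem.Dict.mk r).getD "name" ""), pvNorm ((PySem.Dict.mk r).getD "city" ""))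

def group_by_name_city (records : List (List (String × String))) :
    List (String × String × List (List (String × String))) :=
  let groups := records.foldl
    (fun (groups : PySem.Dict (String × String) (List (List (String × String)))) r =>
      let key := pvKey r
      let groups := if groups.contains key then groups else groups.insert key []
      -- groups[key].append(r): key is present here, so modify with default [] is exact
      groups.modify key [] (fun v => v ++ [r]))
    PySem.Dict.empty
  -- the returned dict, flattened to (name, city, group) triples per the type convention
  groups.items.map (fun p => (p.1.1, p.1.2, p.2))

-- ===== PORT B =====
def group_by_name_city_alt (records : List (List (String × String))) :
    List (String × String × List (List (String × String))) :=
  let keys := records.map pvKey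
  let order := PySem.List.dedup keys
  order.map (fun k =>
    (k.1, k.2, ((records.zip keys).filter (fun p => p.2 == k)).map (·.1)))

-- ===== PRECONDITION & SPEC =====
def Spec_group_by_name_city (records : List (List (String × String))) (out : List (String × String × List (List (String × String)))) : Prop := out = group_by_name_city_alt records
instance (records : List (List (String × String))) (out : List (String × String × List (List (String × String)))) : Decidable (Spec_group_by_name_city records out) := by unfold Spec_group_by_name_city; infer_instance

-- ===== CLAIM (what is proved, stated in full; the proofs are below) =====
def Claim_equal_group_by_name_city : Prop := ∀ (records : List (List (String × String))), Dom_group_by_name_city records → Spec_group_by_name_city records (group_by_name_city records)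

-- ===== LEMMAS AND PROOFS =====

-- A's "ensure key, then append" step is exactly Dict.modify with default []
theorem pv_step_eq_modify {κ β : Type} [BEq κ] [LawfulBEq κ] (d : PySem.Dict κ (List β))
    (k : κ) (r : β) :
    (if d.contains k then d else d.insert k []).modify k [] (fun v => v ++ [r])
      = d.modify k [] (fun v => v ++ [r]) := by
  by_cases h : d.contains k
  · simp [h]
  · have h' : d.contains k = false := by simp [h]
    simp only [h, Bool.false_eq_true, if_false]
    apply PySem.Dict.ext
    simp only [PySem.Dict.modify, PySem.Dict.getD_insert_self,
      PySem.Dict.getD_of_not_contains _ _ h', List.nil_append]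
    simp only [PySem.Dict.insert, PySem.Dict.contains] at *
    simp only [List.any_eq_false] at h'
    simp [List.any_append, List.any_eq_false.mpr h']
    apply List.map_congr_left ?_ |>.trans (List.map_id _)
    intro p hp
    simp [h' p hp]

-- a Nodup-keyed dict is the map of its keys through getD
theorem pv_items_eq_map_keys {κ ν : Type} [BEq κ] [LawfulBEq κ]
    (d : PySem.Dict κ ν) (h : d.keys.Nodup) (d0 : ν) :
    d.items = d.keys.map (fun k => (k, d.getD k d0)) := by
  simp only [PySem.Dict.keys, List.map_map]
  refine (List.map_congr_left ?_ |>.trans (List.map_id _)).symm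
  intro p hp
  simp [PySem.Dict.getD_of_mem_items d (k := p.1) (v := p.2) (by simpa using hp) h d0]

-- filtering the zipped (record, key) pairs is filtering the records by key
theorem pv_zip_filter {α κ : Type} [BEq κ] (f : α → κ) (records : List α) (k : κ) :
    (((records.zip (records.map f)).filter (fun p => p.2 == k)).map (·.1))
      = records.filter (fun r => f r == k) := by
  induction records with
  | nil => rfl
  | cons r t ih =>
    simp only [List.map_cons, List.zip_cons_cons, List.filter_cons]
    by_cases h : (f r == k) = true <;> simp [h, ih]

theorem pv_main (records : List (List (String × String))) :
    group_by_name_city records = group_by_name_city_alt records := by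
  unfold group_by_name_city group_by_name_city_alt
  dsimp only
  have hstep : (fun (g : PySem.Dict (String × String) (List (List (String × String)))) r =>
      let key := pvKey r
      let g := if g.contains key then g else g.insert key []
      g.modify key [] (fun v => v ++ [r]))
    = (fun g r => g.modify (pvKey r) [] (fun v => v ++ [r])) := by
    funext g r
    exact pv_step_eq_modify g (pvKey r) r
  rw [hstep]
  have hmap : records.foldl (fun g r => g.modify (pvKey r) [] (fun v => v ++ [r])) PySem.Dict.empty
      = (records.map (fun r => (pvKey r, r))).foldl
          (fun g p => g.modify p.1 [] (fun v => v ++ [p.2])) PySem.Dict.empty := by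
    rw [List.foldl_map]
  rw [hmap]
  set l := records.map (fun r => (pvKey r, r)) with hl
  set D := l.foldl (fun g p => g.modify p.1 [] (fun v => v ++ [p.2])) PySem.Dict.empty with hD
  have hkeys : D.keys = PySem.Set.ofList (records.map pvKey) := by
    rw [hD, PySem.Dict.keys_foldl_modify_key]
    simp [hl, List.map_map, PySem.Set.ofList, PySem.Set.update, Function.comp_def]
  have hnodup : D.keys.Nodup := by
    rw [hD]
    exact PySem.Dict.nodup_keys_foldl_modify_key l _ _ _ _ (by simp)
  have hgetD : ∀ c, D.getD c [] = records.filter (fun r => pvKey r == c) := by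
    intro c
    rw [hD, PySem.Dict.getD_foldl_modify_append]
    simp [hl, List.filter_map, List.map_map, Function.comp_def]
  rw [pv_items_eq_map_keys D hnodup [], hkeys, List.map_map]
  simp only [PySem.List.dedup_eq_ofList]
  apply List.map_congr_left
  intro k hk
  simp [hgetD k, pv_zip_filter pvKey records k]

-- ===== VERDICT (by name: the statement is the Claim_ definition above) =====
theorem group_by_name_city_spec : Claim_equal_group_by_name_city := by
  intro records _
  exact pv_main records
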